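-- pv_equiv track=rewrite | github.com/hougantc-nvda/IsaacTeleop | src/postprocessing/egocentric_hand_reconstruction/quality_control/detect_jumpy_hand_from_world_results.py | _filter_single_false
-- ===== SOURCE A (Python) =====
-- from typing import Dict, List, Optional, Tuple
--
-- def _filter_single_false(mask: List[bool], window: int = 10) -> List[bool]:
--     """
--     Return a copy of mask where a single false is turned true if the previous
--     and following `window` frames are all true (isolated single-frame false).
--     """
--     T = len(mask)
--     out = list(mask)
--     for t in range(T):
--         if mask[t]:
--             continue
--         prev_ok = t >= window and all(mask[i] for i in range(t - window, t))
--         next_ok = t + window < T and all(mask[i] for i in range(t + 1, t + window + 1))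
--         if prev_ok and next_ok:
--             out[t] = True
--     return out
-- ===== SOURCE B (Python) =====
-- def _filter_single_false(mask, window=10):
--     """Prefix-sum re-implementation: each window check is O(1)."""
--     T = len(mask)
--     pref = [0]
--     s = 0
--     for m in mask:
--         s += 1 if m else 0
--         pref.append(s)
--     def all_true(a, b):
--         # all(mask[a:b]) for 0 <= a,b <= T; empty range counts as true
--         return a >= b or pref[b] - pref[a] == b - a
--     out = []
--     for t, m in enumerate(mask):
--         if m:
--             out.append(True)
--         else:
--             prev_ok = t >= window and all_true(t - window, t)
--             next_ok = t + window < T and all_true(t + 1, t + window + 1)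
--             out.append(prev_ok and next_ok)
--     return out
-- ===== Notes on version B (the rewrite author's own statement) =====
-- stated objective: faster
-- what changed: B precomputes a prefix-sum table of the mask once and decides each 'all frames true in window' check with one O(1) subtraction, instead of A's per-frame O(window) all() scans.
import Mathlib
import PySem

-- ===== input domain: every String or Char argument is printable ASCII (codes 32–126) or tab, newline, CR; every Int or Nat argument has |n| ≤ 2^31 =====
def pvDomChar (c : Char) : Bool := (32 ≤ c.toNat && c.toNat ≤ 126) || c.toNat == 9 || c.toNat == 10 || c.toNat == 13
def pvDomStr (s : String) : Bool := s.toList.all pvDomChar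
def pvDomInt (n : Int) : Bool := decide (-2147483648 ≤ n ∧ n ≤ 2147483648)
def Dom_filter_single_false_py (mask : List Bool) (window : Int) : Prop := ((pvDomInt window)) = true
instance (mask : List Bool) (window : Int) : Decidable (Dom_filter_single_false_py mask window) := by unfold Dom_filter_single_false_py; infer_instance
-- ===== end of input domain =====

-- B replaces A's per-frame O(window) all() scans by a prefix-sum table, making each window check O(1); return values are identical.

-- ===== PORT A =====
-- all(mask[i] for i in range(lo, hi))
def pyAllSeg (mask : List Bool) (lo hi : Int) : Bool :=
  (PySem.List.pyRange lo hi 1).all (fun i => (PySem.List.pyGet? mask i).getD false)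

def filter_single_false_py (mask : List Bool) (window : Int) : List Bool :=
  let T : Int := (mask.length : Int)
  (PySem.List.pyRange 0 T 1).foldl (fun out t =>
    if (PySem.List.pyGet? mask t).getD false then out
    else
      let prev_ok := decide (window ≤ t) && pyAllSeg mask (t - window) t
      let next_ok := decide (t + window < T) && pyAllSeg mask (t + 1) (t + window + 1)
      if prev_ok && next_ok then out.set t.toNat true else out) mask

-- ===== PORT B =====
-- the prefix-sum building loop: s += m; pref.append(s)
def prefB (mask : List Bool) : List Int × Int :=
  mask.foldl (fun ps m => (ps.1 ++ [ps.2 + (if m then 1 else 0)], ps.2 + (if m then 1 else 0))) ([0], 0)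

-- all(mask[a:b]) via the prefix table, O(1)
def allTrueB (pref : List Int) (a b : Int) : Bool :=
  decide (b ≤ a) || decide ((PySem.List.pyGet? pref b).getD 0 - (PySem.List.pyGet? pref a).getD 0 = b - a)

def filter_single_false_py_alt (mask : List Bool) (window : Int) : List Bool :=
  let T : Int := (mask.length : Int)
  let pref := (prefB mask).1
  (PySem.List.enumerate mask 0).foldl (fun out p =>
    out ++ [if p.2 then true
            else (decide (window ≤ p.1) && allTrueB pref (p.1 - window) p.1)
              && (decide (p.1 + window < T) && allTrueB pref (p.1 + 1) (p.1 + window + 1))]) []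

-- ===== PRECONDITION & SPEC =====
def Spec_filter_single_false_py (mask : List Bool) (window : Int) (out : List Bool) : Prop := out = filter_single_false_py_alt mask window
instance (mask : List Bool) (window : Int) (out : List Bool) : Decidable (Spec_filter_single_false_py mask window out) := by unfold Spec_filter_single_false_py; infer_instance

-- ===== CLAIM (what is proved, stated in full; the proofs are below) =====
def Claim_equal_filter_single_false_py : Prop := ∀ (mask : List Bool) (window : Int), Dom_filter_single_false_py mask window → Spec_filter_single_false_py mask window (filter_single_false_py mask window)

-- ===== LEMMAS AND PROOFS =====

-- counting trues, as an Int
def cntI : List Bool → Int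
  | [] => 0
  | m :: r => (if m then 1 else 0) + cntI r

-- the tail of the prefix-sum list produced by prefB
def psums (s : Int) : List Bool → List Int
  | [] => []
  | m :: r => (s + (if m then 1 else 0)) :: psums (s + (if m then 1 else 0)) r

lemma cntI_append (l1 l2 : List Bool) : cntI (l1 ++ l2) = cntI l1 + cntI l2 := by
  induction l1 with
  | nil => simp [cntI]
  | cons m r ih => simp [cntI, ih]; ring

lemma cntI_le_length (l : List Bool) : cntI l ≤ (l.length : Int) := by
  induction l with
  | nil => simp [cntI]
  | cons m r ih => simp [cntI]; split <;> omega

lemma cntI_eq_length_iff (l : List Bool) : cntI l = (l.length : Int) ↔ ∀ x ∈ l, x = true := by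
  induction l with
  | nil => simp [cntI]
  | cons m r ih =>
    have := cntI_le_length r
    simp [cntI]
    rcases m with _ | _
    · constructor
      · intro h; simp at h; omega
      · intro h; simp at h
    · constructor
      · intro h; simp at h ⊢
        intro hx; have := (ih.mp (by omega)) false hx; simp_all
      · intro h; simp at h ⊢
        have : cntI r = (r.length : Int) := by
          apply ih.mpr; intro x hx
          rcases x with _ | _
          · exact absurd hx h
          · rfl
        omega

lemma prefB_fold (l : List Bool) : ∀ (P : List Int) (s : Int),
    l.foldl (fun ps m => (ps.1 ++ [ps.2 + (if m then 1 else 0)], ps.2 + (if m then 1 else 0))) (P, s)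
    = (P ++ psums s l, s + cntI l) := by
  induction l with
  | nil => intro P s; simp [psums, cntI]
  | cons m r ih =>
    intro P s
    simp only [List.foldl_cons, ih, psums, cntI]
    rw [Prod.mk.injEq]
    constructor
    · simp
    · ring

lemma prefB_fst (mask : List Bool) : (prefB mask).1 = 0 :: psums 0 mask := by
  simpa using congrArg Prod.fst (prefB_fold mask [0] 0)

lemma psums_getElem? (l : List Bool) : ∀ (s : Int) (k : Nat), k < l.length →
    (psums s l)[k]? = some (s + cntI (l.take (k + 1))) := by
  induction l with
  | nil => intro s k h; simp at h
  | cons m r ih =>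
    intro s k h
    cases k with
    | zero => simp [psums, cntI]
    | succ k =>
      simp only [psums, List.getElem?_cons_succ]
      rw [ih _ k (by simpa using h)]
      simp [cntI]; ring

lemma pref_getElem? (mask : List Bool) (i : Nat) (hi : i ≤ mask.length) :
    (prefB mask).1[i]? = some (cntI (mask.take i)) := by
  rw [prefB_fst]
  cases i with
  | zero => simp [cntI]
  | succ i =>
    simp only [List.getElem?_cons_succ]
    rw [psums_getElem? mask 0 i (by omega)]
    simp

lemma seg_length (mask : List Bool) (a b : Nat) (hb : b ≤ mask.length) :
    ((mask.drop a).take (b - a)).length = b - a := by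
  simp [List.length_take, List.length_drop]; omega

-- harvesting: all-true over to a pointwise statement
lemma allSeg_iff (mask : List Bool) (a b : Int) (ha : 0 ≤ a) (hab : a < b)
    (hb : b ≤ (mask.length : Int)) :
    pyAllSeg mask a b = true ↔ ∀ j : Nat, a.toNat ≤ j → j < b.toNat → mask[j]? = some true := by
  unfold pyAllSeg
  rw [List.all_eq_true]
  constructor
  · intro h j hja hjb
    have hmem : (j : Int) ∈ PySem.List.pyRange a b 1 := by
      rw [PySem.List.mem_pyRange_one]; omega
    have := h _ hmem
    rw [PySem.List.pyGet?_natCast] at this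
    have hjlen : j < mask.length := by omega
    simp [hjlen] at this
    simp [hjlen, this]
  · intro h i hi
    rw [PySem.List.mem_pyRange_one] at hi
    have h0 : 0 ≤ i := le_trans ha hi.1
    have := h i.toNat (by omega) (by omega)
    rw [PySem.List.pyGet?_of_nonneg _ h0, this]
    rfl

lemma allTrueB_iff (mask : List Bool) (a b : Int) (ha : 0 ≤ a) (hab : a < b)
    (hb : b ≤ (mask.length : Int)) :
    allTrueB (prefB mask).1 a b = true ↔ ∀ j : Nat, a.toNat ≤ j → j < b.toNat → mask[j]? = some true := by
  unfold allTrueB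
  have hga : PySem.List.pyGet? (prefB mask).1 a = some (cntI (mask.take a.toNat)) := by
    rw [PySem.List.pyGet?_of_nonneg _ ha, pref_getElem? mask a.toNat (by omega)]
  have hgb : PySem.List.pyGet? (prefB mask).1 b = some (cntI (mask.take b.toNat)) := by
    rw [PySem.List.pyGet?_of_nonneg _ (by omega : (0:Int) ≤ b), pref_getElem? mask b.toNat (by omega)]
  rw [hga, hgb]
  have hsplit : mask.take b.toNat = mask.take a.toNat ++ (mask.drop a.toNat).take (b.toNat - a.toNat) := by
    rw [← List.take_add]
    congr 1
    omega
  have hlen := seg_length mask a.toNat b.toNat (by omega)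
  constructor
  · intro h j hja hjb
    simp only [Option.getD_some, Bool.or_eq_true, decide_eq_true_eq, hsplit, cntI_append] at h
    rcases h with h | h
    · omega
    have hall : ∀ x ∈ (mask.drop a.toNat).take (b.toNat - a.toNat), x = true := by
      apply (cntI_eq_length_iff _).mp
      rw [hlen]; omega
    have hjlen : j < mask.length := by omega
    have hjk : j = a.toNat + (j - a.toNat) := by omega
    have hmem : mask[j] ∈ (mask.drop a.toNat).take (b.toNat - a.toNat) := by
      have hk : j - a.toNat < ((mask.drop a.toNat).take (b.toNat - a.toNat)).length := by omega
      have : ((mask.drop a.toNat).take (b.toNat - a.toNat))[j - a.toNat] = mask[j] := by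
        simp [List.getElem_take, List.getElem_drop]
        congr 1
        omega
      rw [← this]
      exact List.getElem_mem hk
    have := hall _ hmem
    simp [hjlen, this]
  · intro h
    have hall : ∀ x ∈ (mask.drop a.toNat).take (b.toNat - a.toNat), x = true := by
      intro x hx
      rw [List.mem_iff_getElem] at hx
      obtain ⟨k, hk, hxk⟩ := hx
      have hjlen : a.toNat + k < mask.length := by omega
      have hkk : ((mask.drop a.toNat).take (b.toNat - a.toNat))[k] = mask[a.toNat + k] := by
        simp [List.getElem_take, List.getElem_drop]
      rw [hkk] at hxk
      have h2 := h (a.toNat + k) (by omega) (by omega)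
      simp [hjlen] at h2
      rw [← hxk, h2]
    have hc := (cntI_eq_length_iff _).mpr hall
    rw [hlen] at hc
    simp only [Option.getD_some, hsplit, cntI_append, Bool.or_eq_true, decide_eq_true_eq]
    right
    rw [hc]
    have hba : ((b.toNat - a.toNat : Nat) : Int) = b - a := by omega
    rw [hba]; ring

-- the bridge: the prefix-sum O(1) test equals the all() scan, for 0 ≤ a, b ≤ len
lemma allSeg_eq_allTrueB (mask : List Bool) (a b : Int) (ha : 0 ≤ a) (hb : b ≤ (mask.length : Int)) :
    pyAllSeg mask a b = allTrueB (prefB mask).1 a b := by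
  by_cases hab : b ≤ a
  · unfold pyAllSeg allTrueB
    rw [PySem.List.pyRange_one_eq_nil hab]
    simp [hab]
  · rw [not_le] at hab
    rw [Bool.eq_iff_iff, allSeg_iff mask a b ha hab hb, allTrueB_iff mask a b ha hab hb]

-- A's loop body, with the window condition abstracted as c
def stepA (mask : List Bool) (c : Int → Bool) (out : List Bool) (t : Int) : List Bool :=
  if (PySem.List.pyGet? mask t).getD false then out
  else if c t then out.set t.toNat true else out

lemma foldA_length (mask : List Bool) (c : Int → Bool) (l : List Int) (out : List Bool) :
    (l.foldl (stepA mask c) out).length = out.length := by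
  induction l generalizing out with
  | nil => rfl
  | cons t r ih =>
    simp only [List.foldl_cons, ih]
    unfold stepA
    split_ifs <;> simp

-- A's fold sets index t (independently of out); characterise the result pointwise
lemma foldA_getElem? (mask : List Bool) (c : Int → Bool) (n : Nat) (out : List Bool) :
    ∀ j : Nat,
    ((PySem.List.pyRange 0 (n : Int) 1).foldl (stepA mask c) out)[j]?
    = if j < n ∧ (PySem.List.pyGet? mask (j : Int)).getD false = false ∧ c j = true ∧ j < out.length
      then some true else out[j]? := by
  induction n with
  | zero =>
    intro j
    rw [PySem.List.pyRange_one_eq_nil (by omega)]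
    simp only [List.foldl_nil]
    rw [if_neg (by omega)]
  | succ n ih =>
    intro j
    have hcast : ((n + 1 : Nat) : Int) = (n : Int) + 1 := by push_cast; ring
    rw [hcast, PySem.List.pyRange_one_succ_right (by omega), List.foldl_append]
    simp only [List.foldl_cons, List.foldl_nil]
    have hlen : ((PySem.List.pyRange 0 (n : Int) 1).foldl (stepA mask c) out).length = out.length :=
      foldA_length mask c _ out
    set F := (PySem.List.pyRange 0 (n : Int) 1).foldl (stepA mask c) out with hF
    unfold stepA
    by_cases hm : ((PySem.List.pyGet? mask (n : Int)).getD false) = true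
    · rw [if_pos hm, ih j]
      by_cases hj : j = n
      · subst hj
        rw [if_neg (by omega), if_neg (by intro h; rw [h.2.1] at hm; cases hm)]
      · by_cases hjn : j < n
        · have hiff : (j < n ∧ (PySem.List.pyGet? mask (j : Int)).getD false = false ∧ c (j : Int) = true ∧ j < out.length) ↔ (j < n + 1 ∧ (PySem.List.pyGet? mask (j : Int)).getD false = false ∧ c (j : Int) = true ∧ j < out.length) := by
            constructor <;> (rintro ⟨h1, h2, h3, h4⟩; exact ⟨by omega, h2, h3, h4⟩)
          simp only [hiff]
        · rw [if_neg (by omega), if_neg (by omega)]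
    · rw [if_neg hm]
      rw [Bool.not_eq_true] at hm
      by_cases hc : c (n : Int) = true
      · rw [if_pos hc]
        rw [List.getElem?_set]
        have htn : ((n : Int)).toNat = n := by omega
        rw [htn, hlen]
        by_cases hj : n = j
        · subst hj
          by_cases hout : n < out.length
          · rw [if_pos hout, if_pos rfl, if_pos ⟨by omega, hm, hc, hout⟩]
          · rw [if_neg hout, if_pos rfl, if_neg (by omega), List.getElem?_eq_none (by omega)]
        · rw [if_neg hj, ih j]
          have hiff : (j < n ∧ (PySem.List.pyGet? mask (j : Int)).getD false = false ∧ c (j : Int) = true ∧ j < out.length) ↔ (j < n + 1 ∧ (PySem.List.pyGet? mask (j : Int)).getD false = false ∧ c (j : Int) = true ∧ j < out.length) := by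
            constructor <;> (rintro ⟨h1, h2, h3, h4⟩; refine ⟨by omega, h2, h3, h4⟩)
          · simp only [hiff]
      · rw [if_neg hc, ih j]
        by_cases hj : j = n
        · subst hj
          rw [if_neg (by omega), if_neg (by intro h; exact hc h.2.2.1)]
        · have hiff : (j < n ∧ (PySem.List.pyGet? mask (j : Int)).getD false = false ∧ c (j : Int) = true ∧ j < out.length) ↔ (j < n + 1 ∧ (PySem.List.pyGet? mask (j : Int)).getD false = false ∧ c (j : Int) = true ∧ j < out.length) := by
            constructor <;> (rintro ⟨h1, h2, h3, h4⟩; exact ⟨by omega, h2, h3, h4⟩)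
          simp only [hiff]

-- the two window conditions agree at every in-range index
lemma cond_eq (mask : List Bool) (window : Int) (j : Nat) (hj : j < mask.length) :
    ((decide (window ≤ (j : Int)) && pyAllSeg mask ((j : Int) - window) (j : Int))
      && (decide ((j : Int) + window < (mask.length : Int)) && pyAllSeg mask ((j : Int) + 1) ((j : Int) + window + 1)))
    = ((decide (window ≤ (j : Int)) && allTrueB (prefB mask).1 ((j : Int) - window) (j : Int))
      && (decide ((j : Int) + window < (mask.length : Int)) && allTrueB (prefB mask).1 ((j : Int) + 1) ((j : Int) + window + 1))) := by
  by_cases h1 : window ≤ (j : Int)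
  · rw [allSeg_eq_allTrueB mask _ _ (by omega) (by omega)]
    by_cases h2 : (j : Int) + window < (mask.length : Int)
    · rw [allSeg_eq_allTrueB mask _ _ (by omega) (by omega)]
    · simp [h2]
  · simp [h1]

-- ===== VERDICT (by name: the statement is the Claim_ definition above) =====
theorem filter_single_false_py_spec : Claim_equal_filter_single_false_py := by
  intro mask window _
  unfold Spec_filter_single_false_py
  have hA : filter_single_false_py mask window
      = (PySem.List.pyRange 0 ((mask.length : Nat) : Int) 1).foldl
          (stepA mask (fun t =>
            (decide (window ≤ t) && pyAllSeg mask (t - window) t)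
            && (decide (t + window < (mask.length : Int)) && pyAllSeg mask (t + 1) (t + window + 1)))) mask := rfl
  have hB : filter_single_false_py_alt mask window
      = (PySem.List.enumerate mask 0).map (fun p =>
          if p.2 then true
          else (decide (window ≤ p.1) && allTrueB (prefB mask).1 (p.1 - window) p.1)
            && (decide (p.1 + window < (mask.length : Int)) && allTrueB (prefB mask).1 (p.1 + 1) (p.1 + window + 1))) := by
    unfold filter_single_false_py_alt
    rw [PySem.List.foldl_append_singleton_eq_map, List.nil_append]
  rw [hA, hB]
  apply List.ext_getElem?
  intro j
  rw [foldA_getElem?, List.getElem?_map, PySem.List.getElem?_enumerate]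
  by_cases hj : j < mask.length
  · have hmj : mask[j]? = some mask[j] := List.getElem?_eq_getElem hj
    cases hv : mask[j] with
    | true =>
      rw [if_neg (by rintro ⟨-, h2, -⟩; rw [PySem.List.pyGet?_natCast, hmj, Option.getD_some, hv] at h2; cases h2)]
      rw [hmj]
      simp [hv]
    | false =>
      have hmget : (PySem.List.pyGet? mask (j : Int)).getD false = false := by
        rw [PySem.List.pyGet?_natCast, hmj, Option.getD_some, hv]
      have hcond := cond_eq mask window j hj
      by_cases hca : ((decide (window ≤ (j : Int)) && pyAllSeg mask ((j : Int) - window) (j : Int))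
          && (decide ((j : Int) + window < (mask.length : Int)) && pyAllSeg mask ((j : Int) + 1) ((j : Int) + window + 1))) = true
      · rw [if_pos ⟨hj, hmget, hca, hj⟩, hmj]
        rw [hca] at hcond
        simp [hv, ← hcond]
      · rw [if_neg (by rintro ⟨-, -, h3, -⟩; exact hca h3), hmj]
        rw [Bool.not_eq_true] at hca
        rw [hca] at hcond
        simp [hv, ← hcond]
  · rw [if_neg (by intro h; exact hj h.1)]
    rw [List.getElem?_eq_none (by omega)]
    simp
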